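-- pv_equiv track=rewrite | github.com/BattleGhost/amis_python | km72/Safonov_Artur/12/task3.py | largestgroup
-- ===== SOURCE A (Python) =====
-- def largestgroup(nums):
--     """
--     Ця функція призначена для визначення групи, в якій найбільше елементів
--
--     Args:
--         nums:       список, що перевіряється
--
--     Return:
--         список елементів. Виводиться користувчу
--
--     Raises:
--         OverflowError, TypeError, ValueError, RecursionError
--
--     Examples:
--         [[1, 1, 1], [2], [3, 3], [4, 4], [5], [4, 4], [5]]
--         [1, 1, 1]
--     """
--     if len(nums) > 1:
--         if len(nums[0]) > len(nums[1]):
--             del nums[1]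
--         else:
--             del nums[0]
--         largestgroup(nums)
--     return nums[0]
-- ===== SOURCE B (Python) =====
-- def largestgroup(nums):
--     # One pass with an accumulator: the champion is replaced unless it is
--     # strictly longer than the challenger (so the last maximal-length group wins).
--     # Note: unlike A, this does not mutate the caller's list.
--     best = nums[0]
--     for g in nums[1:]:
--         if not (len(best) > len(g)):
--             best = g
--     return best
-- ===== Notes on version B (the rewrite author's own statement) =====
-- stated objective: simpler
-- what changed: Replaces the recursive in-place pairwise deletion with a single linear fold keeping the current longest group (ties replace, so the last maximal group wins); return value only, B does not mutate nums.
-- outside the precondition, e.g. on largestgroup([]): A raises IndexError, B raises IndexError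
import Mathlib
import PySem

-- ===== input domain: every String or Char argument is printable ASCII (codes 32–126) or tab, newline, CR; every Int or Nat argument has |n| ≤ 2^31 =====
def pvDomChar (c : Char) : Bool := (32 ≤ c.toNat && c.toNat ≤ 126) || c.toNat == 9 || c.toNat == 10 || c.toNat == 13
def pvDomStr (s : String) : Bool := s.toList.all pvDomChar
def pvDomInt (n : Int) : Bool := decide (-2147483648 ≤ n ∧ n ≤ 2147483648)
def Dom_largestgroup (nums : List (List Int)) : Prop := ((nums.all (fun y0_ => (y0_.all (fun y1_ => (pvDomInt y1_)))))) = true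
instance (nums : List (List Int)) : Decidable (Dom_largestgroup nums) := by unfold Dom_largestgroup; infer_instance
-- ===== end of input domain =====

-- B replaces A's recursive in-place pairwise deletion by a single fold keeping the
-- last longest group (simpler); equivalence is about the RETURN value only: A
-- mutates nums down to one element, B does not mutate.

-- ===== PORT A =====
-- A: while more than one element, delete the shorter of the first two (ties delete
-- the first), recursing on the shortened list; finally return nums[0].
def largestgroup (nums : List (List Int)) : List Int :=
  match nums with
  | x :: y :: rest =>
      if x.length > y.length then largestgroup (x :: rest)
      else largestgroup (y :: rest)
  | [x] => x
  | [] => []  -- Python raises IndexError here; excluded by Pre_largestgroup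

-- ===== PORT B =====
def largestgroup_alt (nums : List (List Int)) : List Int :=
  match nums with
  | [] => []  -- Python raises IndexError here; excluded by Pre_largestgroup
  | x :: xs => xs.foldl (fun best g => if best.length > g.length then best else g) x

-- ===== PRECONDITION & SPEC =====
-- Pre_ excludes only the empty list, on which both Pythons raise IndexError.
def Pre_largestgroup (nums : List (List Int)) : Prop := nums ≠ []
instance (nums : List (List Int)) : Decidable (Pre_largestgroup nums) := by unfold Pre_largestgroup; infer_instance
def pvWitness_largestgroup : List (List Int) := [[1, 1, 1], [2], [3, 3]]

def Spec_largestgroup (nums : List (List Int)) (out : List Int) : Prop := out = largestgroup_alt nums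
instance (nums : List (List Int)) (out : List Int) : Decidable (Spec_largestgroup nums out) := by unfold Spec_largestgroup; infer_instance

-- ===== CLAIM (what is proved, stated in full; the proofs are below) =====
def Claim_equal_largestgroup : Prop := ∀ (nums : List (List Int)), Dom_largestgroup nums → Pre_largestgroup nums → Spec_largestgroup nums (largestgroup nums)

-- ===== LEMMAS AND PROOFS =====
theorem largestgroup_cons_eq_foldl (xs : List (List Int)) (x : List Int) :
    largestgroup (x :: xs) =
      xs.foldl (fun best g => if best.length > g.length then best else g) x := by
  induction xs generalizing x with
  | nil => simp [largestgroup]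
  | cons y rest ih =>
      simp only [largestgroup, List.foldl]
      by_cases h : x.length > y.length
      · simp [h, ih]
      · simp [h, ih]

-- ===== VERDICT (by name: the statement is the Claim_ definition above) =====
theorem largestgroup_spec : Claim_equal_largestgroup := by
  intro nums _ hpre
  cases nums with
  | nil => exact absurd rfl hpre
  | cons x xs =>
      unfold Spec_largestgroup largestgroup_alt
      exact largestgroup_cons_eq_foldl xs x
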